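-- pv_equiv track=rewrite | github.com/kentnaoki/Amino_acid_frequency | Amino_acid_frequency/2_sequence_alignment.py | filter_seqs2
-- ===== SOURCE A (Python) =====
-- def filter_seqs2(clus):
-- 	# remove all non-unique sequences
-- 	sequence_dict = {}
-- 	for seq_id, sequence in clus.items():
-- 		if not sequence in sequence_dict:
-- 			sequence_dict[sequence] = []
-- 		sequence_dict[sequence].append(seq_id[:])
-- 	for k in list(sequence_dict.keys()):
-- 		if len(sequence_dict[k]) == 1:
-- 			sequence_dict.pop(k)
-- 	return sequence_dict
-- ===== SOURCE B (Python) =====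
-- def filter_seqs2(clus):
-- 	# count-then-selectively-build: tally sequence frequencies first, then
-- 	# group only the sequences that occur more than once
-- 	counts = {}
-- 	for sequence in clus.values():
-- 		counts[sequence] = counts.get(sequence, 0) + 1
-- 	result = {}
-- 	for seq_id, sequence in clus.items():
-- 		if counts[sequence] > 1:
-- 			result.setdefault(sequence, []).append(seq_id[:])
-- 	return result
-- ===== Notes on version B (the rewrite author's own statement) =====
-- stated objective: alternative
-- what changed: A groups every seq_id by sequence into dict lists and then deletes the singleton groups in a second pruning pass over the keys; B first tallies sequence frequencies into a counter and then builds the result in one selective pass, appending a seq_id only when its sequence's count exceeds 1, so singleton groups are never created.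
import Mathlib
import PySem

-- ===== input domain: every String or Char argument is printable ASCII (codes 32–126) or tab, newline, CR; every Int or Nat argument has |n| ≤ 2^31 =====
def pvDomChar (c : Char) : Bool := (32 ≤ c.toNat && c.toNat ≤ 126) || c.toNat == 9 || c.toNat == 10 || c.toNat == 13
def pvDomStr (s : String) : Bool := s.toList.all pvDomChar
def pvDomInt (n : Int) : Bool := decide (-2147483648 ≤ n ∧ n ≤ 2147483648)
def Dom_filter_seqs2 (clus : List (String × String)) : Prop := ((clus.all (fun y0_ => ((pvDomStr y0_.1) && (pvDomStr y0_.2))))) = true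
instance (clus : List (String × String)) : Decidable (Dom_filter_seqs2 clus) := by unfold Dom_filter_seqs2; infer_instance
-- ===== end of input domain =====

-- B replaces A's build-all-groups-then-prune-singletons with count-frequencies-first-then-build-only-repeated-groups (alternative decomposition, same cost).

-- ===== PORT A =====
-- literal transliteration of A: group seq_ids by sequence (create-empty-entry-then-append),
-- then delete keys whose group has length 1, iterating a snapshot of the keys
def filter_seqs2 (clus : List (String × String)) : List (String × List String) :=
  let sd : PySem.Dict String (List String) :=
    clus.foldl (fun d p =>
      let d := if d.contains p.2 then d else d.insert p.2 ([] : List String)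
      d.insert p.2 (d.getD p.2 [] ++ [p.1])) PySem.Dict.empty
  let sd := sd.keys.foldl (fun d k => if (d.getD k []).length == 1 then d.erase k else d) sd
  sd.items

-- ===== PORT B =====
-- literal transliteration of B: tally counts of the sequences, then one selective
-- grouping pass keeping only sequences with count > 1
def filter_seqs2_alt (clus : List (String × String)) : List (String × List String) :=
  let counts : PySem.Dict String Int :=
    (clus.map (fun p => p.2)).foldl (fun d s => d.insert s (d.getD s 0 + 1)) PySem.Dict.empty
  let result : PySem.Dict String (List String) :=
    clus.foldl (fun r p =>
      if counts.getD p.2 0 > 1 then (r.setdefault p.2 []).modify p.2 [] (· ++ [p.1]) else r)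
      PySem.Dict.empty
  result.items

-- ===== PRECONDITION & SPEC =====
def Spec_filter_seqs2 (clus : List (String × String)) (out : List (String × List String)) : Prop := out = filter_seqs2_alt clus
instance (clus : List (String × String)) (out : List (String × List String)) : Decidable (Spec_filter_seqs2 clus out) := by unfold Spec_filter_seqs2; infer_instance

-- ===== CLAIM (what is proved, stated in full; the proofs are below) =====
def Claim_equal_filter_seqs2 : Prop := ∀ (clus : List (String × String)), Dom_filter_seqs2 clus → Spec_filter_seqs2 clus (filter_seqs2 clus)

-- ===== LEMMAS AND PROOFS =====

-- the canonical grouping fold both ports reduce to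
def pvGrp (l : List (String × String)) : PySem.Dict String (List String) :=
  l.foldl (fun d p => d.modify p.2 [] (· ++ [p.1])) PySem.Dict.empty

theorem pvFoldl_congr {α β : Type} (f g : β → α → β) (l : List α) (init : β)
    (h : ∀ b a, f b a = g b a) : l.foldl f init = l.foldl g init := by
  rw [show f = g from funext fun b => funext fun a => h b a]

-- A's create-then-append step is one dict-modify
theorem pvStepA_eq (d : PySem.Dict String (List String)) (p : String × String) :
    (let d' := if d.contains p.2 then d else d.insert p.2 ([] : List String)
     d'.insert p.2 (d'.getD p.2 [] ++ [p.1])) = d.modify p.2 [] (· ++ [p.1]) := by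
  by_cases h : d.contains p.2 = true
  · simp only [h, if_true]
    rfl
  · have h' : d.contains p.2 = false := eq_false_of_ne_true h
    simp only [h', Bool.false_eq_true, if_false]
    rw [PySem.Dict.getD_insert_self, PySem.Dict.insert_insert_self,
        PySem.Dict.modify, PySem.Dict.getD_of_not_contains d [] h']

-- B's setdefault-then-append step is one dict-modify
theorem pvStepB_eq (r : PySem.Dict String (List String)) (p : String × String) :
    (r.setdefault p.2 []).modify p.2 [] (· ++ [p.1]) = r.modify p.2 [] (· ++ [p.1]) := by
  by_cases h : r.contains p.2 = true
  · rw [PySem.Dict.setdefault_of_contains r [] h]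
  · rw [PySem.Dict.setdefault_of_not_contains r [] (by simpa using h),
        PySem.Dict.modify, PySem.Dict.getD_insert_self, PySem.Dict.insert_insert_self,
        PySem.Dict.modify, PySem.Dict.getD_of_not_contains r [] (by simpa using h)]

theorem pvKeys_grp (l : List (String × String)) :
    (pvGrp l).keys = PySem.Set.ofList (l.map (fun p => p.2)) := by
  unfold pvGrp
  rw [PySem.Dict.keys_foldl_modify_key l (fun p => p.2) [] (fun _ p => (· ++ [p.1]))]
  simp [PySem.Set.ofList_eq_foldl, PySem.Set.update]

theorem pvNodup_keys_grp (l : List (String × String)) : (pvGrp l).keys.Nodup := by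
  unfold pvGrp
  exact PySem.Dict.nodup_keys_foldl_modify_key l (fun p => p.2) [] (fun _ p => (· ++ [p.1]))
    PySem.Dict.empty (by simp)

theorem pvGetD_grp (l : List (String × String)) (s : String) :
    (pvGrp l).getD s [] = (l.filter (fun p => p.2 == s)).map (fun p => p.1) := by
  unfold pvGrp
  have h : (l.foldl (fun d p => d.modify p.2 [] (· ++ [p.1])) PySem.Dict.empty)
      = ((l.map Prod.swap).foldl (fun d q => d.modify q.1 [] (· ++ [q.2])) PySem.Dict.empty) := by
    rw [List.foldl_map]
    rfl
  rw [h, PySem.Dict.getD_foldl_modify_append]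
  simp only [PySem.Dict.getD_empty, List.filter_map, List.nil_append, List.map_map]
  have hfil : List.filter ((fun p : String × String => p.1 == s) ∘ Prod.swap) l
      = List.filter (fun p => p.2 == s) l := List.filter_congr (fun p _ => by simp)
  rw [hfil]
  exact List.map_congr_left (fun p _ => by simp)

theorem pvItems_grp (l : List (String × String)) :
    (pvGrp l).items = (PySem.Set.ofList (l.map (fun p => p.2))).map
      (fun s => (s, (l.filter (fun p => p.2 == s)).map (fun p => p.1))) := by
  rw [PySem.Dict.items_eq_map_keys _ (pvNodup_keys_grp l) [], pvKeys_grp]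
  exact List.map_congr_left (fun s _ => by rw [pvGetD_grp])

-- pruning a dict by a snapshot of keys = filtering its items
theorem pvPrune_items (P : List String → Bool) (ks : List String) :
    ∀ (d : PySem.Dict String (List String)), d.keys.Nodup →
    (ks.foldl (fun d k => if P (d.getD k []) then d.erase k else d) d).items
      = d.items.filter (fun q => !(decide (q.1 ∈ ks) && P q.2)) := by
  induction ks with
  | nil => intro d _; simp
  | cons k ks ih =>
    intro d hd
    simp only [List.foldl_cons]
    by_cases hc : P (d.getD k []) = true
    · rw [if_pos hc]
      have hker : (d.erase k).items = d.items.filter (fun q => !(q.1 == k)) := rfl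
      have hnd : (d.erase k).keys.Nodup := by
        have hs : (d.erase k).keys.Sublist d.keys := by
          simp only [PySem.Dict.keys, PySem.Dict.erase]
          exact List.Sublist.map _ List.filter_sublist
        exact hd.sublist hs
      rw [ih (d.erase k) hnd, hker, List.filter_filter]
      apply List.filter_congr
      rintro ⟨a, v⟩ hq
      by_cases hqk : a = k
      · subst hqk
        have hv : P v = true := by
          rw [PySem.Dict.getD_of_mem_items d hq hd []] at hc; exact hc
        simp [hv]
      · simp [hqk, List.mem_cons]
    · rw [if_neg hc]
      rw [ih d hd]
      apply List.filter_congr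
      rintro ⟨a, v⟩ hq
      by_cases hqk : a = k
      · subst hqk
        have hv : P v = false := by
          rw [PySem.Dict.getD_of_mem_items d hq hd []] at hc
          exact eq_false_of_ne_true hc
        simp [hv]
      · simp [hqk, List.mem_cons]

-- A = grouping, then dropping singleton groups
theorem pvA_eq (clus : List (String × String)) :
    filter_seqs2 clus = (pvGrp clus).items.filter (fun q => !(q.2.length == 1)) := by
  show (((clus.foldl (fun d p =>
      let d := if d.contains p.2 then d else d.insert p.2 ([] : List String)
      d.insert p.2 (d.getD p.2 [] ++ [p.1])) PySem.Dict.empty).keys.foldl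
      (fun d k => if (d.getD k []).length == 1 then d.erase k else d)
      (clus.foldl (fun d p =>
      let d := if d.contains p.2 then d else d.insert p.2 ([] : List String)
      d.insert p.2 (d.getD p.2 [] ++ [p.1])) PySem.Dict.empty)).items)
    = (pvGrp clus).items.filter (fun q => !(q.2.length == 1))
  have h1 : (clus.foldl (fun d p =>
      let d := if d.contains p.2 then d else d.insert p.2 ([] : List String)
      d.insert p.2 (d.getD p.2 [] ++ [p.1])) PySem.Dict.empty) = pvGrp clus := by
    unfold pvGrp
    exact pvFoldl_congr _ _ clus _ (fun d p => pvStepA_eq d p)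
  rw [h1, pvPrune_items (fun v => v.length == 1) (pvGrp clus).keys (pvGrp clus)
        (pvNodup_keys_grp clus)]
  apply List.filter_congr
  intro q hq
  have hk : q.1 ∈ (pvGrp clus).keys := List.mem_map.mpr ⟨q, hq, rfl⟩
  simp [hk]

-- B = grouping of the repeated-sequence pairs only
theorem pvB_eq (clus : List (String × String)) :
    filter_seqs2_alt clus
      = (pvGrp (clus.filter (fun p => decide (1 < (clus.map (fun q => q.2)).count p.2)))).items := by
  show ((clus.foldl (fun r p =>
      if ((clus.map (fun p => p.2)).foldl
          (fun d s => d.insert s (d.getD s 0 + 1))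
          (PySem.Dict.empty : PySem.Dict String Int)).getD p.2 0 > 1
      then (r.setdefault p.2 []).modify p.2 [] (· ++ [p.1]) else r)
      (PySem.Dict.empty : PySem.Dict String (List String))).items)
    = (pvGrp (clus.filter (fun p => decide (1 < (clus.map (fun q => q.2)).count p.2)))).items
  have hcnt : ∀ s, ((clus.map (fun p => p.2)).foldl
      (fun d s => d.insert s (d.getD s 0 + 1))
      (PySem.Dict.empty : PySem.Dict String Int)).getD s 0
      = ((clus.map (fun p => p.2)).count s : Int) := by
    intro s
    rw [PySem.Dict.getD_foldl_insert_add_one]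
    simp
  have hstep : (clus.foldl (fun r p =>
      if ((clus.map (fun p => p.2)).foldl
          (fun d s => d.insert s (d.getD s 0 + 1))
          (PySem.Dict.empty : PySem.Dict String Int)).getD p.2 0 > 1
      then (r.setdefault p.2 []).modify p.2 [] (· ++ [p.1]) else r)
      (PySem.Dict.empty : PySem.Dict String (List String)))
      = (clus.foldl (fun r p =>
      if (fun q => decide (1 < (clus.map (fun q' => q'.2)).count q.2)) p = true
      then r.modify p.2 [] (· ++ [p.1]) else r)
      (PySem.Dict.empty : PySem.Dict String (List String))) := by
    apply pvFoldl_congr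
    intro r p
    by_cases h : 1 < (clus.map (fun q => q.2)).count p.2
    · rw [if_pos, if_pos (by simpa using h), pvStepB_eq]
      rw [hcnt]
      exact_mod_cast h
    · rw [if_neg, if_neg (by simpa using h)]
      rw [hcnt]
      intro hcontra
      exact h (by exact_mod_cast hcontra)
  rw [hstep, ← List.foldl_filter]
  rfl

-- ordered dedup commutes with filter
theorem pvOfList_filter (c : String → Bool) (l : List String) :
    PySem.Set.ofList (l.filter c) = (PySem.Set.ofList l).filter c := by
  induction l using List.reverseRecOn with
  | nil => simp [PySem.Set.ofList_eq_foldl]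
  | append_singleton l x ih =>
    rw [List.filter_append]
    by_cases hx : c x = true
    · have h1 : PySem.Set.ofList (l.filter c ++ [x])
          = PySem.Set.add (PySem.Set.ofList (l.filter c)) x := by
        simp [PySem.Set.ofList_eq_foldl, List.foldl_append]
      have h2 : PySem.Set.ofList (l ++ [x]) = PySem.Set.add (PySem.Set.ofList l) x := by
        simp [PySem.Set.ofList_eq_foldl, List.foldl_append]
      have hfx : List.filter c [x] = [x] := by simp [hx]
      rw [hfx, h1, h2, ih]
      by_cases hmem : x ∈ PySem.Set.ofList l
      · have hmem' : x ∈ (PySem.Set.ofList l).filter c :=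
          List.mem_filter.mpr ⟨hmem, hx⟩
        simp [PySem.Set.add, PySem.Set.contains, hmem, hmem']
      · have hmem' : x ∉ (PySem.Set.ofList l).filter c := fun h =>
          hmem (List.mem_filter.mp h).1
        simp [PySem.Set.add, PySem.Set.contains, hmem, hmem', List.filter_append, hx]
    · have hx' : c x = false := eq_false_of_ne_true hx
      have h2 : PySem.Set.ofList (l ++ [x]) = PySem.Set.add (PySem.Set.ofList l) x := by
        simp [PySem.Set.ofList_eq_foldl, List.foldl_append]
      have hfx : List.filter c [x] = [] := by simp [hx']
      rw [hfx, List.append_nil, h2, ih]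
      by_cases hmem : x ∈ PySem.Set.ofList l
      · simp [PySem.Set.add, PySem.Set.contains, hmem]
      · simp [PySem.Set.add, PySem.Set.contains, hmem, List.filter_append, hx']

-- group sizes are occurrence counts
theorem pvLen_group (clus : List (String × String)) (s : String) :
    ((clus.filter (fun p => p.2 == s)).map (fun p => p.1)).length
      = (clus.map (fun p => p.2)).count s := by
  rw [List.length_map, List.count_eq_countP, List.countP_map, List.countP_eq_length_filter]
  rfl

theorem pvMain (clus : List (String × String)) : filter_seqs2 clus = filter_seqs2_alt clus := by
  rw [pvA_eq, pvB_eq, pvItems_grp, pvItems_grp]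
  rw [List.filter_map]
  have hvals : (clus.filter (fun p => decide (1 < (clus.map (fun q => q.2)).count p.2))).map
      (fun p => p.2) = (clus.map (fun p => p.2)).filter
      (fun v => decide (1 < (clus.map (fun q => q.2)).count v)) := by
    rw [List.filter_map]
    rfl
  rw [hvals, pvOfList_filter]
  have hpred : (PySem.Set.ofList (clus.map (fun p => p.2))).filter
      ((fun q : String × List String => !(q.2.length == 1)) ∘
        (fun s => (s, (clus.filter (fun p => p.2 == s)).map (fun p => p.1))))
      = (PySem.Set.ofList (clus.map (fun p => p.2))).filter
      (fun v => decide (1 < (clus.map (fun q => q.2)).count v)) := by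
    apply List.filter_congr
    intro s hs
    have hmem : s ∈ clus.map (fun p => p.2) := (PySem.Set.mem_ofList _ s).mp hs
    have hpos : 0 < (clus.map (fun p => p.2)).count s := List.count_pos_iff.mpr hmem
    simp only [Function.comp, pvLen_group]
    rcases Nat.lt_or_ge 1 ((clus.map (fun p => p.2)).count s) with h | h
    · simp [h, Nat.ne_of_gt h]
    · have : (clus.map (fun p => p.2)).count s = 1 := le_antisymm h hpos
      simp [this]
  rw [hpred]
  apply List.map_congr_left
  intro s hs
  have h1 : decide (1 < (clus.map (fun q => q.2)).count s) = true :=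
    (List.mem_filter.mp hs).2
  have hgrp : (clus.filter (fun p => decide (1 < (clus.map (fun q => q.2)).count p.2))).filter
      (fun p => p.2 == s) = clus.filter (fun p => p.2 == s) := by
    rw [List.filter_filter]
    apply List.filter_congr
    intro p _
    by_cases hp : p.2 = s
    · rw [hp]; simp [h1]
    · simp [hp]
  rw [hgrp]

-- ===== VERDICT (by name: the statement is the Claim_ definition above) =====
theorem filter_seqs2_spec : Claim_equal_filter_seqs2 := by
  intro clus _
  unfold Spec_filter_seqs2
  exact pvMain clus
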